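-- pv_equiv track=rewrite | github.com/james-stuff/AdventofCode | aoc_2024.py | day_15_p2_widen_warehouse
-- ===== SOURCE A (Python) =====
-- def day_15_p2_widen_warehouse(warehouse: {}) -> {}:
--     wide = {}
--     for loc in warehouse:
--         doubled = (loc * 2) - len(
--             [*filter(lambda i: i[0] < loc and i[1] == "\n", warehouse.items())]
--         )
--         match warehouse[loc]:
--             case "O":
--                 wide[doubled] = "["
--                 wide[doubled + 1] = "]"
--             case "\n":
--                 wide[doubled] = "\n"
--             case "@":
--                 wide[doubled] = "@"
--                 wide[doubled + 1] = "."
--             case _: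
--                 wide[doubled] = wide[doubled + 1] = warehouse[loc]
--     return wide
-- ===== SOURCE B (Python) =====
-- def day_15_p2_widen_warehouse(warehouse: {}) -> {}:
--     # One sorted pass precomputes each location's doubled column (running newline count),
--     # replacing A's per-location scan of all items.
--     doubled_at = {}
--     newlines = 0
--     for loc in sorted(warehouse):
--         doubled_at[loc] = loc * 2 - newlines
--         if warehouse[loc] == "\n":
--             newlines += 1
--     wide = {}
--     for loc in warehouse:
--         doubled = doubled_at[loc]
--         v = warehouse[loc]
--         if v == "O":
--             wide[doubled] = "["
--             wide[doubled + 1] = "]"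
--         elif v == "\n":
--             wide[doubled] = "\n"
--         elif v == "@":
--             wide[doubled] = "@"
--             wide[doubled + 1] = "."
--         else:
--             wide[doubled] = wide[doubled + 1] = v
--     return wide
-- ===== Notes on version B (the rewrite author's own statement) =====
-- stated objective: faster
-- what changed: A rescans all items for every location to count preceding newlines (quadratic); B makes one pass over the sorted locations carrying a running newline count to precompute every doubled column, then builds the widened map with table lookups.
import Mathlib
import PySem

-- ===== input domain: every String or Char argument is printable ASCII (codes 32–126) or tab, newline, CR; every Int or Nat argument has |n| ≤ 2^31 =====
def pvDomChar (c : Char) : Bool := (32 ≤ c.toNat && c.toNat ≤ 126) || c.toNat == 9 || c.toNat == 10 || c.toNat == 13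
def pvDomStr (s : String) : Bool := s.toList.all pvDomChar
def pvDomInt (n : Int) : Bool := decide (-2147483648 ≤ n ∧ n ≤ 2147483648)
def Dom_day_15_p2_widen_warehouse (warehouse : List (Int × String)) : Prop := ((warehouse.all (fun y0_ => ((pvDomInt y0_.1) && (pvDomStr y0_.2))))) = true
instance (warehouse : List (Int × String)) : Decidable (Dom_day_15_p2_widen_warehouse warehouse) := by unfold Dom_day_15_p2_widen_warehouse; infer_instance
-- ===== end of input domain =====

-- B replaces A's per-location scan of all items with one sorted pass that precomputes every
-- doubled column while carrying a running newline count (objective: faster, O(n log n) vs O(n^2)).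

-- ===== PORT A =====
-- the body of A's loop (the `match warehouse[loc]` block), shared literally by both ports
def pvWidenStep (wide : PySem.Dict Int String) (doubled : Int) (v : String) : PySem.Dict Int String :=
  if v == "O" then (wide.insert doubled "[").insert (doubled + 1) "]"
  else if v == "\n" then wide.insert doubled "\n"
  else if v == "@" then (wide.insert doubled "@").insert (doubled + 1) "."
  else (wide.insert doubled v).insert (doubled + 1) v

def day_15_p2_widen_warehouse (warehouse : List (Int × String)) : List (Int × String) :=
  let d := PySem.Dict.ofList warehouse
  let wide := d.keys.foldl (fun wide loc =>
    let doubled : Int := loc * 2 -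
      ((d.items.filter (fun i => decide (i.1 < loc) && (i.2 == "\n"))).length : Int)
    pvWidenStep wide doubled (d.getD loc "")) PySem.Dict.empty
  wide.items

-- ===== PORT B =====
def day_15_p2_widen_warehouse_alt (warehouse : List (Int × String)) : List (Int × String) :=
  let d := PySem.Dict.ofList warehouse
  -- first loop: over sorted keys, running newline count
  let da := (PySem.List.sorted d.keys (fun x => x) false).foldl
    (fun (p : PySem.Dict Int Int × Int) loc =>
      (p.1.insert loc (loc * 2 - p.2),
       if d.getD loc "" == "\n" then p.2 + 1 else p.2))
    (PySem.Dict.empty, 0)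
  -- second loop: over insertion order, table lookup
  let wide := d.keys.foldl (fun wide loc =>
    let doubled : Int := da.1.getD loc 0
    pvWidenStep wide doubled (d.getD loc "")) PySem.Dict.empty
  wide.items

-- ===== PRECONDITION & SPEC =====
def Spec_day_15_p2_widen_warehouse (warehouse : List (Int × String)) (out : List (Int × String)) : Prop := out = day_15_p2_widen_warehouse_alt warehouse
instance (warehouse : List (Int × String)) (out : List (Int × String)) : Decidable (Spec_day_15_p2_widen_warehouse warehouse out) := by unfold Spec_day_15_p2_widen_warehouse; infer_instance

-- ===== CLAIM (what is proved, stated in full; the proofs are below) =====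
def Claim_equal_day_15_p2_widen_warehouse : Prop := ∀ (warehouse : List (Int × String)), Dom_day_15_p2_widen_warehouse warehouse → Spec_day_15_p2_widen_warehouse warehouse (day_15_p2_widen_warehouse warehouse)

-- ===== LEMMAS AND PROOFS =====

-- abbreviation for B's first-loop step over a fixed value table vf
def pvStepB (vf : Int → String) (p : PySem.Dict Int Int × Int) (loc : Int) : PySem.Dict Int Int × Int :=
  (p.1.insert loc (loc * 2 - p.2), if vf loc == "\n" then p.2 + 1 else p.2)

-- a key not in the list is untouched by the first loop
lemma pvStepB_getD_not_mem (vf : Int → String) (s : List Int) (p : PySem.Dict Int Int × Int)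
    (x : Int) (hx : x ∉ s) : ((s.foldl (pvStepB vf) p).1).getD x 0 = p.1.getD x 0 := by
  induction s generalizing p with
  | nil => rfl
  | cons k rest ih =>
    simp only [List.foldl_cons]
    rw [ih _ (fun h => hx (List.mem_cons_of_mem _ h))]
    exact PySem.Dict.getD_insert_of_ne _ _ _ (fun h => hx (h ▸ List.mem_cons_self))

-- on a strictly increasing list, the table holds 2·loc − (c₀ + #newlines below loc)
lemma pvStepB_getD_mem (vf : Int → String) (s : List Int) (hs : s.Pairwise (· < ·))
    (d0 : PySem.Dict Int Int) (c0 : Int) (loc : Int) (hloc : loc ∈ s) :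
    ((s.foldl (pvStepB vf) (d0, c0)).1).getD loc 0 =
      loc * 2 - (c0 + (s.countP (fun k => decide (k < loc) && (vf k == "\n"))) ) := by
  induction s generalizing d0 c0 with
  | nil => cases hloc
  | cons k rest ih =>
    rcases List.pairwise_cons.mp hs with ⟨hk, hrest⟩
    rcases List.mem_cons.mp hloc with h | h
    · subst h
      simp only [List.foldl_cons, pvStepB]
      rw [pvStepB_getD_not_mem vf rest _ loc (fun hm => lt_irrefl loc (hk loc hm))]
      rw [PySem.Dict.getD_insert_self]
      have hcnt : (loc :: rest).countP (fun j => decide (j < loc) && (vf j == "\n")) = 0 := by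
        rw [List.countP_eq_zero]
        intro j hj
        rcases List.mem_cons.mp hj with rfl | hj'
        · simp
        · simp [not_lt.mpr (le_of_lt (hk j hj'))]
      rw [hcnt]; ring
    · simp only [List.foldl_cons, pvStepB]
      rw [ih hrest _ _ h]
      have hklt : k < loc := hk loc h
      have hcnt : (k :: rest).countP (fun j => decide (j < loc) && (vf j == "\n")) =
          (if vf k == "\n" then 1 else 0) + rest.countP (fun j => decide (j < loc) && (vf j == "\n")) := by
        rw [List.countP_cons]
        simp [hklt]
        cases h : (vf k == "\n") <;> simp [Nat.add_comm]
        
      rw [hcnt]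
      push_cast
      cases h' : (vf k == "\n") <;> simp <;> ring

-- ===== VERDICT (by name: the statement is the Claim_ definition above) =====
-- the second loops of A and B coincide, hence so do the two ports
theorem day_15_p2_widen_warehouse_spec : Claim_equal_day_15_p2_widen_warehouse := by
  intro warehouse _
  unfold Spec_day_15_p2_widen_warehouse day_15_p2_widen_warehouse day_15_p2_widen_warehouse_alt
  simp only []
  set d := PySem.Dict.ofList warehouse with hd
  have hnd : d.keys.Nodup := PySem.Dict.nodup_keys_ofList warehouse
  set vf : Int → String := fun k => d.getD k "" with hvf
  -- B's first loop runs over the sorted keys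
  set s := PySem.List.sorted d.keys (fun x => x) false with hsrt
  have hperm : s.Perm d.keys := PySem.List.sorted_perm d.keys (fun x => x) false
  have hsle : s.Pairwise (fun a b => a ≤ b) := PySem.List.sorted_pairwise d.keys (fun x => x)
  have hsnd : s.Nodup := hperm.nodup_iff.mpr hnd
  have hslt : s.Pairwise (· < ·) := by
    have := hsle.and hsnd
    exact this.imp (fun h => lt_of_le_of_ne h.1 h.2)
  -- doubled values agree on every key of d
  have hdoubled : ∀ loc ∈ d.keys,
      ((s.foldl (pvStepB vf) (PySem.Dict.empty, 0)).1).getD loc 0 =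
      loc * 2 - ((d.items.filter (fun i => decide (i.1 < loc) && (i.2 == "\n"))).length : Int) := by
    intro loc hloc
    rw [pvStepB_getD_mem vf s hslt _ 0 loc (hperm.mem_iff.mpr hloc)]
    have hitems : d.items = d.keys.map (fun k => (k, d.getD k "")) :=
      PySem.Dict.items_eq_map_keys d hnd ""
    have hflt : (d.items.filter (fun i => decide (i.1 < loc) && (i.2 == "\n"))).length =
        d.keys.countP (fun k => decide (k < loc) && (vf k == "\n")) := by
      rw [hitems, ← List.countP_eq_length_filter, List.countP_map]
      rfl
    rw [hflt, hperm.countP_eq]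
    ring
  -- the two second loops are the same fold of equal step functions
  have hfold : ∀ (acc : PySem.Dict Int String) (ks : List Int), (∀ k ∈ ks, k ∈ d.keys) →
      ks.foldl (fun wide loc =>
        pvWidenStep wide (loc * 2 -
          ((d.items.filter (fun i => decide (i.1 < loc) && (i.2 == "\n"))).length : Int))
          (d.getD loc "")) acc =
      ks.foldl (fun wide loc =>
        pvWidenStep wide (((s.foldl (pvStepB vf) (PySem.Dict.empty, 0)).1).getD loc 0)
          (d.getD loc "")) acc := by
    intro acc ks hks
    induction ks generalizing acc with
    | nil => rfl
    | cons k rest ih =>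
      simp only [List.foldl_cons]
      rw [hdoubled k (hks k List.mem_cons_self)]
      exact ih _ (fun j hj => hks j (List.mem_cons_of_mem _ hj))
  have := hfold PySem.Dict.empty d.keys (fun _ h => h)
  congr 1
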